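-- pv_equiv track=rewrite | github.com/HarshaanNiles010/Advent-Of-Code | AOC-2015/Day-8/part1.py | part1
-- ===== SOURCE A (Python) =====
-- from typing import List
--
-- def part1(lines: List[str]):
--     t = 0
--     for l in lines:
--         t += 2
--         escaped = False
--         for s in l:
--             if not escaped and s == '\\':
--                 escaped = True
--             elif escaped:
--                 if s == '\\' or s == '"':
--                     t += 1
--                 elif s == 'x':
--                     t += 3
--                 escaped = False
--     return t
-- ===== SOURCE B (Python) =====
-- from typing import List
--
-- _SCORE = {'\\': 1, '"': 1, 'x': 3}
--
-- def _captures(l: str) -> list: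
--     # left-to-right, non-overlapping backslash pairing: the char after each backslash
--     out = []
--     i, n = 0, len(l)
--     while i < n:
--         if l[i] == '\\' and i + 1 < n:
--             out.append(l[i + 1])
--             i += 2
--         else:
--             i += 1
--     return out
--
-- def part1(lines: List[str]):
--     return 2 * len(lines) + sum(_SCORE.get(c, 0) for l in lines for c in _captures(l))
-- ===== Notes on version B (the rewrite author's own statement) =====
-- stated objective: alternative
-- what changed: Replaces A's per-character boolean `escaped` state machine with a two-phase decomposition: a tokenizer that extracts the character after each backslash (consuming two characters per escape, greedy left-to-right) and a score-table (dict) lookup summed over all captures.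
import Mathlib
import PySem

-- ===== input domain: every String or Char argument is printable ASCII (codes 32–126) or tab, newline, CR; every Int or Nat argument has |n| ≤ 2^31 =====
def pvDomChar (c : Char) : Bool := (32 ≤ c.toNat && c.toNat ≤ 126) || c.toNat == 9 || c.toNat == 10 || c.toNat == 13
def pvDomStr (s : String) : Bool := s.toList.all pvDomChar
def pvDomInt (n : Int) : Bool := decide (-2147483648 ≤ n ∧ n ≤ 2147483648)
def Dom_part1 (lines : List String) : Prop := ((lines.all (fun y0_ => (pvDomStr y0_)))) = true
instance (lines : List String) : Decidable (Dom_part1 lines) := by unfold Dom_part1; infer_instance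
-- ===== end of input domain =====

-- B replaces A's per-character `escaped` state machine by a backslash-pair tokenizer
-- plus a score-table sum (objective: alternative decomposition, same asymptotic cost).

-- ===== PORT A =====
-- the body of A's inner `for s in l` loop, over the state (t, escaped)
def pvStepA (st : Int × Bool) (s : Char) : Int × Bool :=
  if !st.2 && s == '\\' then (st.1, true)
  else if st.2 then
    (if s == '\\' || s == '"' then st.1 + 1
     else if s == 'x' then st.1 + 3
     else st.1, false)
  else st

def part1 (lines : List String) : Int :=
  lines.foldl (fun t l => (l.toList.foldl pvStepA (t + 2, false)).1) 0

-- ===== PORT B =====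
-- Source B's _captures: the char after each backslash, greedy left-to-right pairing
def pvCaptures : List Char → List Char
  | [] => []
  | c :: rest =>
    if c = '\\' then
      match rest with
      | [] => []
      | d :: rest2 => d :: pvCaptures rest2
    else pvCaptures rest

-- Source B's _SCORE dict
def pvScore : PySem.Dict Char Int := PySem.Dict.mk [('\\', 1), ('"', 1), ('x', 3)]

def part1_alt (lines : List String) : Int :=
  2 * (lines.length : Int) +
    ((lines.flatMap (fun l => pvCaptures l.toList)).map (fun c => pvScore.getD c 0)).sum

-- ===== PRECONDITION & SPEC =====
def Spec_part1 (lines : List String) (out : Int) : Prop := out = part1_alt lines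
instance (lines : List String) (out : Int) : Decidable (Spec_part1 lines out) := by unfold Spec_part1; infer_instance

-- ===== CLAIM (what is proved, stated in full; the proofs are below) =====
def Claim_equal_part1 : Prop := ∀ (lines : List String), Dom_part1 lines → Spec_part1 lines (part1 lines)

-- ===== LEMMAS AND PROOFS =====
theorem pvCaptures_two (d : Char) (rest2 : List Char) :
    pvCaptures ('\\' :: d :: rest2) = d :: pvCaptures rest2 := by
  rw [pvCaptures.eq_def]
  simp

theorem pvCaptures_skip (c : Char) (rest : List Char) (h : ¬c = '\\') :
    pvCaptures (c :: rest) = pvCaptures rest := by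
  rw [pvCaptures.eq_def]
  simp [h]

theorem pvScore_getD (c : Char) :
    pvScore.getD c 0 = if c = '\\' || c = '"' then (1 : Int) else if c = 'x' then 3 else 0 := by
  by_cases h1 : c = '\\'
  · subst h1; decide
  · by_cases h2 : c = '"'
    · subst h2; decide
    · by_cases h3 : c = 'x'
      · subst h3; decide
      · simp only [pvScore, PySem.Dict.getD_eq_get?_getD, PySem.Dict.get?, List.find?]
        rw [show ('\\' == c) = false from beq_eq_false_iff_ne.mpr (Ne.symm h1),
            show ('"' == c) = false from beq_eq_false_iff_ne.mpr (Ne.symm h2),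
            show ('x' == c) = false from beq_eq_false_iff_ne.mpr (Ne.symm h3)]
        simp [h1, h2, h3]

theorem pvInner (cs : List Char) : ∀ t : Int,
    (cs.foldl pvStepA (t, false)).1 = t + ((pvCaptures cs).map (fun c => pvScore.getD c 0)).sum := by
  induction cs using pvCaptures.induct with
  | case1 => intro t; simp [pvCaptures]
  | case2 =>
      intro t
      simp [pvCaptures, pvStepA]
  | case3 d rest2 ih =>
      intro t
      rw [pvCaptures_two]
      simp only [List.foldl_cons, List.map_cons, List.sum_cons]
      by_cases h1 : d = '\\'
      · subst h1; simp [pvStepA, ih, pvScore_getD]; ring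
      · by_cases h2 : d = '"'
        · subst h2; simp [pvStepA, ih, pvScore_getD]; ring
        · by_cases h3 : d = 'x'
          · subst h3; simp [pvStepA, ih, pvScore_getD]; ring
          · simp [pvStepA, h1, h2, h3, ih, pvScore_getD]
  | case4 c rest h ih =>
      intro t
      simp [pvCaptures_skip c rest h, pvStepA, h, ih]

theorem pvOuter (lines : List String) : ∀ t0 : Int,
    lines.foldl (fun t l => (l.toList.foldl pvStepA (t + 2, false)).1) t0
      = t0 + part1_alt lines := by
  induction lines with
  | nil => intro t0; simp [part1_alt]
  | cons l ls ih =>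
      intro t0
      simp only [List.foldl_cons]
      rw [ih, pvInner]
      simp only [part1_alt, List.flatMap_cons, List.map_append, List.sum_append,
        List.length_cons]
      push_cast
      ring

-- ===== VERDICT (by name: the statement is the Claim_ definition above) =====
theorem part1_spec : Claim_equal_part1 := by
  intro lines _
  unfold Spec_part1 part1
  rw [pvOuter]
  simp
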